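-- pv_equiv track=rewrite | github.com/karishmakrishnan/Python-Learning | Level-3-Exercise/Logest_word_in_sentance.py | longWordList
-- ===== SOURCE A (Python) =====
-- def longWordList(s):
--     wordList = list()
--     if (len(s) == 0):
--         return None
--     wordlen = len(s[0])
--     for x in s:
--         if(len(x) >= wordlen):
--             wordList.append(x)
--             wordlen = len(x)
--     return wordList
-- ===== SOURCE B (Python) =====
-- def longWordList(s):
--     if not s:
--         return None
--     prefmax = []
--     m = 0
--     for w in s:
--         m = max(m, len(w))
--         prefmax.append(m)
--     return [w for w, p in zip(s, prefmax) if len(w) == p]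
-- ===== Notes on version B (the rewrite author's own statement) =====
-- stated objective: alternative
-- what changed: Replaces the interleaved scan that mutates a running-max and appends in the same branch with a compute-then-filter decomposition: first build the inclusive prefix-maximum table of word lengths, then keep exactly the words whose length equals their prefix-max entry.
import Mathlib
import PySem

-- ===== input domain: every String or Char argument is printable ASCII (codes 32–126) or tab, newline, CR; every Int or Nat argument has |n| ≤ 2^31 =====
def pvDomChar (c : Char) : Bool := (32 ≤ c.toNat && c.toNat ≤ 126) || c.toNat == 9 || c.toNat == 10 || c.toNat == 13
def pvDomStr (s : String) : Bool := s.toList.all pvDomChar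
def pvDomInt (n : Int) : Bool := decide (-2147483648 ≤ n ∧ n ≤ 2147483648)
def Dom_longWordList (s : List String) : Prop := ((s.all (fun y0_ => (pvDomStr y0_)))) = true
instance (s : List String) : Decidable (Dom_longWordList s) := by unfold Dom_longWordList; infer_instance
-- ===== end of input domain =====

-- B replaces A's interleaved running-max scan with a prefix-max table plus a filter; return values are proved equal.

-- ===== PORT A =====
-- the loop body of A: append x and update wordlen when len(x) >= wordlen
def lwlStepA (st : List String × Int) (x : String) : List String × Int :=
  if st.2 ≤ PySem.Str.len x then (st.1 ++ [x], PySem.Str.len x) else st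

def longWordList (s : List String) : Option (List String) :=
  match s with
  | [] => none
  | h :: _ => some ((s.foldl lwlStepA ([], PySem.Str.len h)).1)

-- ===== PORT B =====
-- B's first loop body: running max m, appended to the table
def lwlStepB (acc : List Int × Int) (w : String) : List Int × Int :=
  let m := max acc.2 (PySem.Str.len w)
  (acc.1 ++ [m], m)

def longWordList_alt (s : List String) : Option (List String) :=
  match s with
  | [] => none
  | _ =>
    let prefmax := (s.foldl lwlStepB ([], 0)).1
    some (((s.zip prefmax).filter (fun p => PySem.Str.len p.1 == p.2)).map Prod.fst)

-- ===== PRECONDITION & SPEC =====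
def Spec_longWordList (s : List String) (out : Option (List String)) : Prop := out = longWordList_alt s
instance (s : List String) (out : Option (List String)) : Decidable (Spec_longWordList s out) := by unfold Spec_longWordList; infer_instance

-- ===== CLAIM (what is proved, stated in full; the proofs are below) =====
def Claim_equal_longWordList : Prop := ∀ (s : List String), Dom_longWordList s → Spec_longWordList s (longWordList s)

-- ===== LEMMAS AND PROOFS =====

-- the prefix-max table as a structural recursion (proof-side model of B's first loop)
def lwlPm (t : List String) (m : Int) : List Int :=
  match t with
  | [] => []
  | x :: t => max m (PySem.Str.len x) :: lwlPm t (max m (PySem.Str.len x))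

theorem lwlStepB_fst (t : List String) (acc : List Int) (m : Int) :
    (t.foldl lwlStepB (acc, m)).1 = acc ++ lwlPm t m := by
  induction t generalizing acc m with
  | nil => simp [lwlPm]
  | cons x t ih => simp [List.foldl, lwlStepB, lwlPm, ih, List.append_assoc]

theorem lwlMain (t : List String) (acc : List String) (m : Int) :
    (t.foldl lwlStepA (acc, m)).1 =
      acc ++ ((t.zip (lwlPm t m)).filter (fun p => PySem.Str.len p.1 == p.2)).map Prod.fst := by
  induction t generalizing acc m with
  | nil => simp [lwlPm]
  | cons x t ih =>
    simp only [List.foldl_cons, lwlStepA, lwlPm, List.zip_cons_cons, List.filter_cons]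
    by_cases h : m ≤ PySem.Str.len x
    · rw [if_pos h, max_eq_right h]
      have hb : (PySem.Str.len x == PySem.Str.len x) = true := by simp
      rw [hb, ih]
      simp
    · rw [if_neg h, max_eq_left (by omega)]
      have hb : (PySem.Str.len x == m) = false := by
        simp only [beq_eq_false_iff_ne, ne_eq]
        omega
      rw [hb, ih]
      simp

theorem lwlLen_nonneg (x : String) : 0 ≤ PySem.Str.len x := by
  simp [PySem.Str.len_eq]

-- ===== VERDICT (by name: the statement is the Claim_ definition above) =====
theorem longWordList_spec : Claim_equal_longWordList := by
  intro s _
  unfold Spec_longWordList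
  cases s with
  | nil => rfl
  | cons h t =>
    show some (((h :: t).foldl lwlStepA ([], PySem.Str.len h)).1) = _
    have h0 : max 0 (PySem.Str.len h) = PySem.Str.len h := max_eq_right (lwlLen_nonneg h)
    simp only [longWordList_alt, lwlStepB_fst, List.nil_append, lwlMain, lwlPm, h0, max_self]
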